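-- pv_equiv track=rewrite | github.com/chloe1129/algorithm_work | 프로그래머스/temp/addpaint.py | solution
-- ===== SOURCE A (Python) =====
-- def solution(n, m, section):
--     answer = 0
--
--     if m == 1:
--         return len(section)
--     elif m == n:
--         return 1
--     else:
--         s = section[0]
--         l = section[-1]
--         while (True):
--             s += m
--             answer += 1
--             if s >= n:
--                 break
--             l -= m
--             answer += 1
--             if l < s:
--                 break
--         return answer
-- ===== SOURCE B (Python) =====
-- def solution(n, m, section):
--     if m == 1:
--         return len(section)
--     if m == n:
--         return 1
--     s, l = section[0], section[-1]
--     # first k >= 1 with s + k*m >= n  (break on the "s" half-step, stroke 2*k1 - 1)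
--     k1 = max(1, -((s - n) // m))
--     # first k >= 1 with l - k*m < s + k*m  (break on the "l" half-step, stroke 2*k2)
--     k2 = max(1, (l - s) // (2 * m) + 1)
--     return min(2 * k1 - 1, 2 * k2)
-- ===== Notes on version B (the rewrite author's own statement) =====
-- stated objective: alternative
-- what changed: Replaced A's while-loop that alternately advances both painters by m until a break fires with a closed-form computation: the first breaking step on each side is obtained by ceiling/floor division and the answer is the minimum of the two.
-- outside the precondition, e.g. on solution(1, 0, [5]): A returns 1, B raises ZeroDivisionError; on solution(1, -2, [5]): A returns 1, B returns 2; on solution(10, 3, []): A raises IndexError, B raises IndexError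
import Mathlib
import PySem

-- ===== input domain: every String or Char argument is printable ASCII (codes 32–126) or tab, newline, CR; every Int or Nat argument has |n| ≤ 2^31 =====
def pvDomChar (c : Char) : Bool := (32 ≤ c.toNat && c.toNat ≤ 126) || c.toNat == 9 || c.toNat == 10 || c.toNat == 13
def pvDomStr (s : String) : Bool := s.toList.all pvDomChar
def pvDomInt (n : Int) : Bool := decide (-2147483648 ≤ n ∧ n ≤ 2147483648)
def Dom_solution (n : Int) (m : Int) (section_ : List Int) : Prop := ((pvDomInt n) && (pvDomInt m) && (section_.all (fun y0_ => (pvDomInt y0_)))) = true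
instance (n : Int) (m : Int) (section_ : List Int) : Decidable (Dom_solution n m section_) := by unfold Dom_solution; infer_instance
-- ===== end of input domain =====

-- B replaces A's step-by-step while-loop with a closed-form ceiling/floor-division computation of the first break step on each side.

-- ===== PORT A =====
-- The while-True loop of A; fuel only makes the recursion total (solution passes
-- enough fuel for every input admitted by Pre_solution).
def solutionLoopA (fuel : Nat) (n : Int) (m : Int) (s : Int) (l : Int) (answer : Int) : Int :=
  match fuel with
  | 0 => answer
  | fuel + 1 =>
    let s := s + m
    let answer := answer + 1
    if n ≤ s then answer
    else
      let l := l - m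
      let answer := answer + 1
      if l < s then answer
      else solutionLoopA fuel n m s l answer

def solution (n : Int) (m : Int) (section_ : List Int) : Int :=
  if m = 1 then (section_.length : Int)
  else if m = n then 1
  else
    match PySem.List.pyGet? section_ 0, PySem.List.pyGet? section_ (-1) with
    | some s, some l => solutionLoopA ((n - s).toNat + 1) n m s l 0
    | _, _ => 0   -- IndexError in Python (empty section); excluded by Pre_solution

-- ===== PORT B =====
def solution_alt (n : Int) (m : Int) (section_ : List Int) : Int :=
  if m = 1 then (section_.length : Int)
  else if m = n then 1
  else
    match PySem.List.pyGet? section_ 0 with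
    | none => 0   -- IndexError in Python (empty section); excluded by Pre_solution
    | some s =>
      match PySem.List.pyGet? section_ (-1) with
      | none => 0
      | some l =>
        let k1 := max 1 (-(PySem.Int.floordiv (s - n) m))
        let k2 := max 1 (PySem.Int.floordiv (l - s) (2 * m) + 1)
        min (2 * k1 - 1) (2 * k2)

-- ===== PRECONDITION & SPEC =====
-- Pre_ excludes (a) the empty section list with m ∉ {1, n}, on which A raises IndexError,
-- and (b) m ≤ 0 with m ∉ {1, n}, where A's while-loop diverges on most inputs and on the
-- rest returns an accidental 1 or 2 from a loop run backwards, while B's division raises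
-- or computes the formula for forward motion.
def Pre_solution (n : Int) (m : Int) (section_ : List Int) : Prop :=
  m = 1 ∨ m = n ∨ (2 ≤ m ∧ section_ ≠ [])
instance (n : Int) (m : Int) (section_ : List Int) : Decidable (Pre_solution n m section_) := by unfold Pre_solution; infer_instance
def pvWitness_solution : Int × Int × List Int := (10, 3, [2, 8])
def Spec_solution (n : Int) (m : Int) (section_ : List Int) (out : Int) : Prop := out = solution_alt n m section_
instance (n : Int) (m : Int) (section_ : List Int) (out : Int) : Decidable (Spec_solution n m section_ out) := by unfold Spec_solution; infer_instance

-- ===== CLAIM (what is proved, stated in full; the proofs are below) =====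
def Claim_equal_solution : Prop := ∀ (n : Int) (m : Int) (section_ : List Int), Dom_solution n m section_ → Pre_solution n m section_ → Spec_solution n m section_ (solution n m section_)

-- ===== LEMMAS AND PROOFS =====

-- k1 s = first k ≥ 1 with n ≤ s + k*m;  k2 s l = first k ≥ 1 with l - k*m < s + k*m (for 0 < m)
def pvK1 (n m s : Int) : Int := max 1 (-(PySem.Int.floordiv (s - n) m))
def pvK2 (m s l : Int) : Int := max 1 (PySem.Int.floordiv (l - s) (2 * m) + 1)

lemma pvK1_one (n m s : Int) (hm : 0 < m) : pvK1 n m s = 1 ↔ n ≤ s + m := by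
  unfold pvK1
  constructor
  · intro h
    have h2 : -(PySem.Int.floordiv (s - n) m) ≤ 1 := by omega
    by_contra hn
    have : 2 ≤ -(PySem.Int.floordiv (s - n) m) := by
      have := (PySem.Int.floordiv_lt_iff_lt_mul (a := s - n) (b := m) (q := -1) hm).mpr
        (by nlinarith)
      omega
    omega
  · intro h
    have h1 : -1 ≤ PySem.Int.floordiv (s - n) m := by
      have := (PySem.Int.le_floordiv_iff_mul_le (a := s - n) (b := m) (q := -1) hm).mpr
        (by nlinarith)
      omega
    omega

lemma pvK2_one (m s l : Int) (hm : 0 < m) : pvK2 m s l = 1 ↔ l - m < s + m := by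
  unfold pvK2
  have h2m : 0 < 2 * m := by omega
  constructor
  · intro h
    have h2 : PySem.Int.floordiv (l - s) (2 * m) + 1 ≤ 1 := by omega
    have := (PySem.Int.le_floordiv_iff_mul_le (a := l - s) (b := 2 * m) (q := 1) h2m)
    by_contra hn
    have : 1 ≤ PySem.Int.floordiv (l - s) (2 * m) := this.mpr (by nlinarith)
    omega
  · intro h
    have : PySem.Int.floordiv (l - s) (2 * m) < 1 :=
      (PySem.Int.floordiv_lt_iff_lt_mul (a := l - s) (b := 2 * m) (q := 1) h2m).mpr
        (by nlinarith)
    omega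

lemma pvK1_shift (n m s : Int) (hm : 0 < m) (h : ¬ n ≤ s + m) :
    pvK1 n m (s + m) = pvK1 n m s - 1 := by
  unfold pvK1
  have hstep : PySem.Int.floordiv (s + m - n) m = PySem.Int.floordiv (s - n) m + 1 := by
    have hq := PySem.Int.floordiv_mul_add_mod (s - n) m
    have hr0 := PySem.Int.mod_nonneg (s - n) hm
    have hrlt := PySem.Int.mod_lt (s - n) hm
    rw [PySem.Int.floordiv_eq_iff_of_pos hm]
    constructor <;> nlinarith
  have hK1 : PySem.Int.floordiv (s - n) m ≤ -2 := by
    have := (PySem.Int.floordiv_lt_iff_lt_mul (a := s - n) (b := m) (q := -1) hm).mpr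
      (by nlinarith)
    omega
  rw [hstep]; omega

lemma pvK2_shift (m s l : Int) (hm : 0 < m) (h : ¬ l - m < s + m) :
    pvK2 m (s + m) (l - m) = pvK2 m s l - 1 := by
  unfold pvK2
  have h2m : 0 < 2 * m := by omega
  have hstep : PySem.Int.floordiv (l - m - (s + m)) (2 * m)
      = PySem.Int.floordiv (l - s) (2 * m) - 1 := by
    have hq := PySem.Int.floordiv_mul_add_mod (l - s) (2 * m)
    have hr0 := PySem.Int.mod_nonneg (l - s) h2m
    have hrlt := PySem.Int.mod_lt (l - s) h2m
    rw [PySem.Int.floordiv_eq_iff_of_pos h2m]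
    constructor <;> nlinarith
  have hK2 : 1 ≤ PySem.Int.floordiv (l - s) (2 * m) := by
    exact (PySem.Int.le_floordiv_iff_mul_le (a := l - s) (b := 2 * m) (q := 1) h2m).mpr
      (by nlinarith)
  rw [hstep]; omega

lemma loopA_closed (n m : Int) (hm : 0 < m) :
    ∀ (fuel : Nat) (s l a : Int), (pvK1 n m s).toNat ≤ fuel →
      solutionLoopA fuel n m s l a = a + min (2 * pvK1 n m s - 1) (2 * pvK2 m s l) := by
  intro fuel
  induction fuel with
  | zero =>
    intro s l a hf
    exfalso
    have : 1 ≤ pvK1 n m s := le_max_left _ _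
    omega
  | succ fuel ih =>
    intro s l a hf
    simp only [solutionLoopA]
    by_cases h1 : n ≤ s + m
    · have hk1 : pvK1 n m s = 1 := (pvK1_one n m s hm).mpr h1
      have hk2 : 1 ≤ pvK2 m s l := le_max_left _ _
      rw [if_pos h1, hk1]
      omega
    · rw [if_neg h1]
      by_cases h2 : l - m < s + m
      · have hk2 : pvK2 m s l = 1 := (pvK2_one m s l hm).mpr h2
        have hk1 : 1 ≤ pvK1 n m s := le_max_left _ _
        have hk1' : pvK1 n m s ≠ 1 := fun h => h1 ((pvK1_one n m s hm).mp h)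
        rw [if_pos h2, hk2]
        omega
      · rw [if_neg h2]
        have hs := pvK1_shift n m s hm h1
        have hl := pvK2_shift m s l hm h2
        have hk1 : 1 ≤ pvK1 n m s := le_max_left _ _
        have hk1' : pvK1 n m s ≠ 1 := fun h => h1 ((pvK1_one n m s hm).mp h)
        have hrec := ih (s + m) (l - m) (a + 1 + 1) (by rw [hs]; omega)
        rw [hrec, hs, hl]
        have hk2 : 1 ≤ pvK2 m s l := le_max_left _ _
        have hk2' : pvK2 m s l ≠ 1 := fun h => h2 ((pvK2_one m s l hm).mp h)
        omega

lemma fuel_enough (n m s : Int) (hm : 0 < m) : (pvK1 n m s).toNat ≤ (n - s).toNat + 1 := by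
  unfold pvK1
  by_cases h : n - s ≤ 1
  · have : PySem.Int.floordiv (s - n) m ≥ -1 := by
      have := (PySem.Int.le_floordiv_iff_mul_le (a := s - n) (b := m) (q := -1) hm).mpr
        (by nlinarith)
      omega
    omega
  · have hle : -(PySem.Int.floordiv (s - n) m) ≤ n - s := by
      have := (PySem.Int.le_floordiv_iff_mul_le (a := s - n) (b := m) (q := -(n - s)) hm).mpr
        (by nlinarith [mul_nonneg (by omega : (0:Int) ≤ n - s) (by omega : (0:Int) ≤ m - 1)])
      omega
    omega

-- ===== VERDICT (by name: the statement is the Claim_ definition above) =====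
theorem solution_spec : Claim_equal_solution := by
  intro n m section_ _ hpre
  unfold Spec_solution solution solution_alt
  by_cases h1 : m = 1
  · simp [h1]
  · rw [if_neg h1, if_neg h1]
    by_cases h2 : m = n
    · simp [h2]
    · rw [if_neg h2, if_neg h2]
      have hm2 : 2 ≤ m ∧ section_ ≠ [] := by
        rcases hpre with h | h | h
        · exact absurd h h1
        · exact absurd h h2
        · exact h
      obtain ⟨hm, hne⟩ := hm2
      obtain ⟨x, xs, rfl⟩ := List.exists_cons_of_ne_nil hne
      have h0 : PySem.List.pyGet? (x :: xs) 0 = some x := PySem.List.pyGet?_zero_cons x xs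
      have hlast : ∃ y, PySem.List.pyGet? (x :: xs) (-1) = some y := by
        rw [PySem.List.pyGet?_neg_one]
        exact ⟨(x :: xs).getLast (by simp), List.getLast?_eq_some_getLast (by simp)⟩
      obtain ⟨y, hy⟩ := hlast
      rw [h0, hy]
      have hmpos : 0 < m := by omega
      simp only []
      rw [loopA_closed n m hmpos _ x y 0 (fuel_enough n m x hmpos)]
      simp [pvK1, pvK2]
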